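-- pv_equiv track=rewrite | github.com/spirtexc/project | receptionist.py | extract_prefix_and_number
-- ===== SOURCE A (Python) =====
-- def extract_prefix_and_number(id_string):
--     """Extract prefix and number from ID like 'P123' -> ('P', 123)"""
--     s = str(id_string).strip()
--     prefix = ""
--     num = ""
--
--     for ch in s:
--         if ch.isdigit():
--             num += ch
--         else:
--             # Only add to prefix if we haven't started collecting numbers
--             if not num:
--                 prefix += ch
--
--     num_val = int(num) if num.isdigit() else 0
--     return prefix, num_val
-- ===== SOURCE B (Python) =====
-- def extract_prefix_and_number(id_string):
--     """Extract prefix and number from ID like 'P123' -> ('P', 123)"""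
--     s = str(id_string).strip()
--     digits = ''.join(ch for ch in s if ch.isdigit())
--     i = 0
--     while i < len(s) and not s[i].isdigit():
--         i += 1
--     return s[:i], (int(digits) if digits else 0)
-- ===== Notes on version B (the rewrite author's own statement) =====
-- stated objective: simpler
-- what changed: Replaces A's single flag-driven loop maintaining two growing strings with two independent passes: an index scan up to the first digit gives the prefix as a slice, and a digit filter joined once gives the number.
import Mathlib
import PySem

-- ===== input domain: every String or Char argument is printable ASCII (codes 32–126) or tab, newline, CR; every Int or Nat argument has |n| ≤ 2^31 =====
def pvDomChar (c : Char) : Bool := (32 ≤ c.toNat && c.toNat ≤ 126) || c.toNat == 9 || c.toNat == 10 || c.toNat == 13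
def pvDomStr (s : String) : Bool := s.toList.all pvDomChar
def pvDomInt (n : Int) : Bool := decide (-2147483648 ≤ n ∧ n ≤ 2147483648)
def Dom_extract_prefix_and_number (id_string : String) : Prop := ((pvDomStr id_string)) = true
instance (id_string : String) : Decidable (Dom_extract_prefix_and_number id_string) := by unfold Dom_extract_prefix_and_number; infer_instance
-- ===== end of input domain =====

-- B replaces A's single flag-driven loop by two independent passes (index scan for the
-- prefix, digit filter for the number) — objective: simpler.

-- ===== PORT A =====
-- A's loop: state (prefix, num); digits go to num, non-digits to prefix only while num is empty.
-- str(id_string) is the identity on a str argument.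
-- int(num) on the 'num.isdigit()' branch: num is a nonempty run of ASCII digits there, so
-- PySem.Int.ofChars? is `some`; .getD 0 only discharges the Option.
def extract_prefix_and_number (id_string : String) : String × Int :=
  let s := PySem.Chars.strip id_string.toList
  let pn := s.foldl (fun (acc : List Char × List Char) ch =>
      if PySem.Chars.isdigit ch then (acc.1, acc.2 ++ [ch])
      else if acc.2 = [] then (acc.1 ++ [ch], acc.2) else acc) ([], [])
  (String.mk pn.1, if PySem.Chars.strIsdigit pn.2 then (PySem.Int.ofChars? pn.2).getD 0 else 0)

-- ===== PORT B =====
-- Source B's while loop: i advances while i < len(s) and s[i] is not a digit.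
def pvScanB (l : List Char) (i : Nat) : Nat :=
  match l with
  | [] => i
  | c :: rest => if !PySem.Chars.isdigit c then pvScanB rest (i + 1) else i

-- digits = ''.join(ch for ch in s if ch.isdigit()); s[:i] with 0 ≤ i is List.take i (exact here);
-- int(digits) is `some` on the nonempty all-digit string, .getD 0 discharges the Option.
def extract_prefix_and_number_alt (id_string : String) : String × Int :=
  let s := PySem.Chars.strip id_string.toList
  let digits := s.filter PySem.Chars.isdigit
  let i := pvScanB s 0
  (String.mk (s.take i), if digits ≠ [] then (PySem.Int.ofChars? digits).getD 0 else 0)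

-- ===== PRECONDITION & SPEC =====
def Spec_extract_prefix_and_number (id_string : String) (out : String × Int) : Prop := out = extract_prefix_and_number_alt id_string
instance (id_string : String) (out : String × Int) : Decidable (Spec_extract_prefix_and_number id_string out) := by unfold Spec_extract_prefix_and_number; infer_instance

-- ===== CLAIM (what is proved, stated in full; the proofs are below) =====
def Claim_equal_extract_prefix_and_number : Prop := ∀ (id_string : String), Dom_extract_prefix_and_number id_string → Spec_extract_prefix_and_number id_string (extract_prefix_and_number id_string)

-- ===== LEMMAS AND PROOFS =====

-- A's fold characterised: prefix grows by the non-digit run up to the first digit (only while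
-- num is still empty), num collects every digit.
theorem pvFoldA_char (l : List Char) (p n : List Char) :
    l.foldl (fun (acc : List Char × List Char) ch =>
      if PySem.Chars.isdigit ch then (acc.1, acc.2 ++ [ch])
      else if acc.2 = [] then (acc.1 ++ [ch], acc.2) else acc) (p, n)
    = (p ++ (if n = [] then l.takeWhile (fun c => !PySem.Chars.isdigit c) else []),
       n ++ l.filter PySem.Chars.isdigit) := by
  induction l generalizing p n with
  | nil => simp
  | cons c rest ih =>
    by_cases hd : PySem.Chars.isdigit c
    · simp only [List.foldl_cons, hd, if_pos, if_true]
      rw [ih]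
      have : n ++ [c] ≠ [] := by simp
      simp [this, hd, List.takeWhile]
    · simp only [List.foldl_cons, hd, if_neg, Bool.false_eq_true, not_false_iff, if_false]
      by_cases hn : n = []
      · simp only [hn, if_pos rfl]
        rw [ih]
        have : p ++ [c] ++ [] = p ++ [] ++ [c] := by simp
        simp [hd, List.takeWhile, List.filter]
      · simp only [if_neg hn]
        rw [ih]
        simp [hn, hd, List.filter]

-- Source B's scan counts the leading non-digit run.
theorem pvScanB_char (l : List Char) (i : Nat) :
    pvScanB l i = i + (l.takeWhile (fun c => !PySem.Chars.isdigit c)).length := by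
  induction l generalizing i with
  | nil => simp [pvScanB]
  | cons c rest ih =>
    by_cases hd : PySem.Chars.isdigit c
    · simp [pvScanB, hd, List.takeWhile]
    · simp [pvScanB, hd, List.takeWhile, ih]
      omega

theorem pvTake_len_takeWhile (p : Char → Bool) (l : List Char) :
    l.take (l.takeWhile p).length = l.takeWhile p := by
  induction l with
  | nil => simp
  | cons c rest ih =>
    by_cases h : p c <;> simp [List.takeWhile, h, ih]

-- ""[.isdigit] of the digit filter: nonempty iff some digit exists, and then every char is a digit.
theorem pvStrIsdigit_filter (l : List Char) :
    PySem.Chars.strIsdigit (l.filter PySem.Chars.isdigit)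
    = !(l.filter PySem.Chars.isdigit).isEmpty := by
  simp only [PySem.Chars.strIsdigit, List.all_eq_true]
  cases h : (l.filter PySem.Chars.isdigit).isEmpty <;>
    simp [fun x hx => (List.mem_filter.mp hx).2]

-- ===== VERDICT (by name: the statement is the Claim_ definition above) =====
theorem extract_prefix_and_number_spec : Claim_equal_extract_prefix_and_number := by
  intro id_string _
  unfold Spec_extract_prefix_and_number extract_prefix_and_number extract_prefix_and_number_alt
  simp only [pvFoldA_char, pvScanB_char, pvStrIsdigit_filter, List.nil_append, Nat.zero_add, pvTake_len_takeWhile]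
  rcases h : (PySem.Chars.strip id_string.toList).filter PySem.Chars.isdigit with _ | ⟨c, cs⟩ <;>
    simp
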